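-- pv_equiv track=rewrite | github.com/tdorr96/ProjectEuler | 11_20/17.py | total_letters
-- ===== SOURCE A (Python) =====
-- digits_to_word = {
--     1: 'one',
--     2: 'two',
--     3: 'three',
--     4: 'four',
--     5: 'five',
--     6: 'six',
--     7: 'seven',
--     8: 'eight',
--     9: 'nine'
-- }
--
-- teens_to_word = {
--     10: 'ten',
--     11: 'eleven',
--     12: 'twelve',
--     13: 'thirteen',
--     14: 'fourteen',
--     15: 'fifteen',
--     16: 'sixteen',
--     17: 'seventeen',
--     18: 'eighteen',
--     19: 'nineteen'
-- }
--
-- tens_to_word = {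
--     20: 'twenty',
--     30: 'thirty',
--     40: 'forty',
--     50: 'fifty',
--     60: 'sixty',
--     70: 'seventy',
--     80: 'eighty',
--     90: 'ninety'
-- }
--
-- def number_to_word(n):
--
--     if n == 1000:
--         return "one thousand"
--
--     s = ""
--
--     if n >= 100:
--         hundreds = int(n/100)
--         s += digits_to_word[hundreds] + " hundred"
--         n -= hundreds * 100
--         if n > 0:
--             s += " and "
--
--     if n > 0:
--         assert 1 <= n <= 99
--         if n in teens_to_word:
--             s += teens_to_word[n]
--         else:
--             tens = n - (n % 10)
--             digits = n % 10
--             if tens > 0: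
--                 s += tens_to_word[tens]
--                 if digits > 0:
--                     s += '-'
--             if digits > 0:
--                 s += digits_to_word[digits]
--
--     return s
--
-- def total_letters(start, end):
--     # Counts how many letters are used in writing out the words from start to end (inclusive)
--
--     letter_count = 0
--     for n in range(start, end+1):
--         s = number_to_word(n)
--         s = s.replace(' ', '')
--         s = s.replace('-' ,'')
--         letter_count += len(s)
--     return letter_count
-- ===== SOURCE B (Python) =====
-- # Arithmetic letter-counting: per-number letter totals from length tables, no string building.
-- UNITS_LEN = [0, 3, 3, 5, 4, 4, 3, 5, 5, 4]          # '', one..nine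
-- TEENS_LEN = [3, 6, 6, 8, 8, 7, 7, 9, 8, 8]          # ten..nineteen
-- TENS_LEN = [0, 0, 6, 6, 5, 5, 5, 7, 6, 6]           # -, -, twenty..ninety
--
-- def letter_length(n):
--     if n <= 0:
--         return 0
--     if n == 1000:
--         return 11                                   # "one thousand"
--     total = 0
--     if n >= 100:
--         total += UNITS_LEN[n // 100] + 7            # e.g. "three" + "hundred"
--         n %= 100
--         if n > 0:
--             total += 3                              # "and"
--     if 10 <= n <= 19:
--         total += TEENS_LEN[n - 10]
--     else:
--         total += TENS_LEN[n // 10] + UNITS_LEN[n % 10]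
--     return total
--
-- def total_letters(start, end):
--     return sum(letter_length(n) for n in range(start, end + 1))
-- ===== Notes on version B (the rewrite author's own statement) =====
-- stated objective: simpler
-- what changed: B replaces A's build-the-English-word-then-strip-and-count string pipeline with direct arithmetic letter-counting from three small length tables, summed over the range.
import Mathlib
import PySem

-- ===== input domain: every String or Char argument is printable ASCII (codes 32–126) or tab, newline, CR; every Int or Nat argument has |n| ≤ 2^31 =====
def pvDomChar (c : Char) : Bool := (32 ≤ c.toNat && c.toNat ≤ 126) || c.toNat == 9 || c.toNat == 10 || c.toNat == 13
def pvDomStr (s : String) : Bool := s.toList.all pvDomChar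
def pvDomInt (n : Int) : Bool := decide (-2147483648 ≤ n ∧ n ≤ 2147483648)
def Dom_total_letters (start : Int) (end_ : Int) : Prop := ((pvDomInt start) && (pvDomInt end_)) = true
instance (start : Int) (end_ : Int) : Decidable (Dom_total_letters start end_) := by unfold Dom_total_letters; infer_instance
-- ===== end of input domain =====

-- B replaces string building with arithmetic letter-length tables; objective: simpler.
-- Pre_ excludes inputs on which A raises: a nonempty range containing some n >= 1001 makes A's
-- digits_to_word[hundreds] lookup raise KeyError.


-- ===== PORT A =====
def pvDigitsToWord : PySem.Dict Int String := PySem.Dict.ofList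
  [(1, "one"), (2, "two"), (3, "three"), (4, "four"), (5, "five"),
   (6, "six"), (7, "seven"), (8, "eight"), (9, "nine")]

def pvTeensToWord : PySem.Dict Int String := PySem.Dict.ofList
  [(10, "ten"), (11, "eleven"), (12, "twelve"), (13, "thirteen"), (14, "fourteen"),
   (15, "fifteen"), (16, "sixteen"), (17, "seventeen"), (18, "eighteen"), (19, "nineteen")]

def pvTensToWord : PySem.Dict Int String := PySem.Dict.ofList
  [(20, "twenty"), (30, "thirty"), (40, "forty"), (50, "fifty"),
   (60, "sixty"), (70, "seventy"), (80, "eighty"), (90, "ninety")]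

-- Dict lookups use getD "": the KeyError case (hundreds ∉ 1..9, i.e. some n ≥ 1001) is excluded by Pre_.
-- int(n/100) is ported as floordiv: exact for the 100 ≤ n ≤ 1000 reached inside Pre_.
-- The Python assert 1 <= n <= 99 always holds on the executed branch and is omitted.
def number_to_word (n : Int) : String :=
  if n = 1000 then "one thousand"
  else
    let s : String := ""
    let sn : String × Int :=
      if n ≥ 100 then
        let hundreds := PySem.Int.floordiv n 100
        let s := s ++ (pvDigitsToWord.getD hundreds "") ++ " hundred"
        let n := n - hundreds * 100
        (if n > 0 then s ++ " and " else s, n)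
      else (s, n)
    let s := sn.1
    let n := sn.2
    if n > 0 then
      if pvTeensToWord.contains n then
        s ++ pvTeensToWord.getD n ""
      else
        let tens := n - PySem.Int.mod n 10
        let digits := PySem.Int.mod n 10
        let s :=
          if tens > 0 then
            let s := s ++ pvTensToWord.getD tens ""
            if digits > 0 then s ++ "-" else s
          else s
        if digits > 0 then s ++ pvDigitsToWord.getD digits "" else s
    else s

def total_letters (start : Int) (end_ : Int) : Int :=
  (PySem.List.pyRange start (end_ + 1) 1).foldl
    (fun letter_count n =>
      letter_count +
        (PySem.Str.len
          (PySem.Str.replace (PySem.Str.replace (number_to_word n) " " "") "-" "") : Int))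
    0

-- ===== PORT B =====
def pvUnitsLen : List Int := [0, 3, 3, 5, 4, 4, 3, 5, 5, 4]
def pvTeensLen : List Int := [3, 6, 6, 8, 8, 7, 7, 9, 8, 8]
def pvTensLen : List Int := [0, 0, 6, 6, 5, 5, 5, 7, 6, 6]

-- List indexing via pyGetD 0: the IndexError case (n ≥ 1001) is excluded by Pre_.
def letter_length (n : Int) : Int :=
  if n ≤ 0 then 0
  else if n = 1000 then 11
  else
    let total : Int := 0
    let tn : Int × Int :=
      if n ≥ 100 then
        let total := total + PySem.List.pyGetD pvUnitsLen (PySem.Int.floordiv n 100) 0 + 7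
        let n := PySem.Int.mod n 100
        (if n > 0 then total + 3 else total, n)
      else (total, n)
    let total := tn.1
    let n := tn.2
    if 10 ≤ n ∧ n ≤ 19 then total + PySem.List.pyGetD pvTeensLen (n - 10) 0
    else total + PySem.List.pyGetD pvTensLen (PySem.Int.floordiv n 10) 0
               + PySem.List.pyGetD pvUnitsLen (PySem.Int.mod n 10) 0

def total_letters_alt (start : Int) (end_ : Int) : Int :=
  (PySem.List.pyRange start (end_ + 1) 1).foldl (fun acc n => acc + letter_length n) 0

-- ===== PRECONDITION & SPEC =====
-- Pre_ excludes exactly the inputs on which A raises: a nonempty range(start, end+1) containing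
-- some n ≥ 1001, where digits_to_word[hundreds] raises KeyError.
def Pre_total_letters (start : Int) (end_ : Int) : Prop := end_ ≤ 1000 ∨ end_ < start
instance (start : Int) (end_ : Int) : Decidable (Pre_total_letters start end_) := by
  unfold Pre_total_letters; infer_instance

def pvWitness_total_letters : Int × Int := (1, 1000)

def Spec_total_letters (start : Int) (end_ : Int) (out : Int) : Prop := out = total_letters_alt start end_
instance (start : Int) (end_ : Int) (out : Int) : Decidable (Spec_total_letters start end_ out) := by
  unfold Spec_total_letters; infer_instance

-- ===== CLAIM (what is proved, stated in full; the proofs are below) =====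
def Claim_equal_total_letters : Prop := ∀ (start : Int) (end_ : Int), Dom_total_letters start end_ → Pre_total_letters start end_ → Spec_total_letters start end_ (total_letters start end_)

-- ===== LEMMAS AND PROOFS =====

def pvALen (n : Int) : Int :=
  (PySem.Str.len (PySem.Str.replace (PySem.Str.replace (number_to_word n) " " "") "-" "") : Int)

def pvClean (cs : List Char) : Int := (((cs.filter (fun c => c != ' ')).filter (fun c => c != '-')).length : Int)

theorem pv_go_filter (c : Char) : ∀ (fuel : Nat) (l acc : List Char), l.length ≤ fuel →
    PySem.Chars.replace.go [c] [] fuel l acc = acc.reverse ++ l.filter (fun a => a != c) := by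
  intro fuel
  induction fuel with
  | zero =>
    intro l acc h
    have : l = [] := by cases l <;> simp_all
    subst this
    simp [PySem.Chars.replace.go]
  | succ fuel ih =>
    intro l acc h
    cases l with
    | nil => simp [PySem.Chars.replace.go]
    | cons c' t =>
      by_cases hc : c = c'
      · subst hc
        rw [PySem.Chars.replace.go]
        simp only [List.isPrefixOf, BEq.rfl, Bool.true_and, if_true]
        rw [ih _ _ (by simpa using Nat.le_of_succ_le_succ h)]
        simp
      · rw [PySem.Chars.replace.go]
        have : ([c].isPrefixOf (c' :: t)) = false := by
          simp [List.isPrefixOf]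
          exact fun hb => absurd hb hc
        rw [this]
        simp only [Bool.false_eq_true, if_false]
        rw [ih _ _ (Nat.le_of_succ_le_succ h)]
        have hcc : (c' != c) = true := by simp [Ne.symm hc]
        simp [hcc]

theorem pv_replace_single (s : List Char) (c : Char) :
    PySem.Chars.replace s [c] [] = s.filter (fun a => a != c) := by
  unfold PySem.Chars.replace
  simp only [List.isEmpty_cons, if_false, Bool.false_eq_true]
  exact pv_go_filter c s.length s [] le_rfl

theorem pvALen_eq_clean (n : Int) : pvALen n = pvClean (number_to_word n).toList := by
  unfold pvALen pvClean
  simp [PySem.Str.len_eq, PySem.Str.toList_replace, pv_replace_single]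

theorem pv_clean_append (a b : List Char) : pvClean (a ++ b) = pvClean a + pvClean b := by
  simp [pvClean, List.filter_append]

set_option maxRecDepth 20000 in
theorem pv_check99 : ∀ k : Nat, k < 99 → pvClean (number_to_word ((k:Int)+1)).toList = letter_length ((k:Int)+1) := by decide

theorem pv_sub99 (n : Int) (h1 : 1 ≤ n) (h2 : n ≤ 99) :
    pvClean (number_to_word n).toList = letter_length n := by
  obtain ⟨k, rfl, hk⟩ : ∃ k : Nat, n = (k:Int)+1 ∧ k < 99 := ⟨(n-1).toNat, by omega, by omega⟩
  exact pv_check99 k hk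

theorem pv_digits (h : Int) (h1 : 1 ≤ h) (h2 : h ≤ 9) :
    pvClean (pvDigitsToWord.getD h "").toList = PySem.List.pyGetD pvUnitsLen h 0 := by
  interval_cases h <;> decide

theorem pv_ntw_hundreds (h r : Int) (hh1 : 1 ≤ h) (hh2 : h ≤ 9) (hr1 : 0 ≤ r) (hr2 : r ≤ 99) :
    (number_to_word (100*h + r)).toList =
      (pvDigitsToWord.getD h "").toList ++ (" hundred" : String).toList ++
        (if 0 < r then (" and " : String).toList ++ (number_to_word r).toList else []) := by
  have hfd : PySem.Int.floordiv (100*h + r) 100 = h := by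
    rw [PySem.Int.floordiv_eq_iff_of_pos (by norm_num)]; constructor <;> nlinarith
  have hne : ¬(100*h + r = 1000) := by omega
  have hge : (100*h + r) ≥ 100 := by omega
  have hsub : 100*h + r - h * 100 = r := by ring
  by_cases hr : 0 < r
  · have hner : ¬(r = 1000) := by omega
    have hger : ¬(r ≥ 100) := by omega
    rw [number_to_word, number_to_word]
    simp only [if_neg hne, if_pos hge, hfd, hsub, if_pos hr, if_neg hner, if_neg hger]
    split_ifs <;> simp [String.toList_append, String.toList_empty]
  · have hr0 : r = 0 := by omega
    subst hr0
    rw [number_to_word]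
    simp only [if_neg hne, if_pos hge, hfd, hsub]
    simp [String.toList_append]

theorem pv_alt_hundreds (h r : Int) (hh1 : 1 ≤ h) (hh2 : h ≤ 9) (hr1 : 0 ≤ r) (hr2 : r ≤ 99) :
    letter_length (100*h + r) =
      PySem.List.pyGetD pvUnitsLen h 0 + 7 + (if 0 < r then 3 + letter_length r else 0) := by
  have hfd : PySem.Int.floordiv (100*h + r) 100 = h := by
    rw [PySem.Int.floordiv_eq_iff_of_pos (by norm_num)]; constructor <;> nlinarith
  have hmod : PySem.Int.mod (100*h + r) 100 = r := by
    have := PySem.Int.floordiv_mul_add_mod (100*h + r) 100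
    rw [hfd] at this; omega
  have hnp : ¬(100*h + r ≤ 0) := by omega
  have hne : ¬(100*h + r = 1000) := by omega
  have hge : (100*h + r) ≥ 100 := by omega
  by_cases hr : 0 < r
  · have hnpr : ¬(r ≤ 0) := by omega
    have hner : ¬(r = 1000) := by omega
    have hger : ¬(r ≥ 100) := by omega
    rw [letter_length, letter_length]
    simp only [if_neg hnp, if_neg hne, if_pos hge, hfd, hmod, if_pos hr, if_neg hnpr,
      if_neg hner, if_neg hger]
    split_ifs <;> ring
  · have hr0 : r = 0 := by omega
    subst hr0
    rw [letter_length]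
    simp only [if_neg hnp, if_neg hne, if_pos hge, hfd, hmod]
    norm_num
    have e1 : PySem.List.pyGetD pvTensLen 0 0 = 0 := by decide
    have e2 : PySem.List.pyGetD pvUnitsLen 0 0 = 0 := by decide
    rw [e1, e2]
    ring

theorem pv_nonpos (n : Int) (h : n ≤ 0) : pvClean (number_to_word n).toList = letter_length n := by
  have h1 : ¬(n = 1000) := by omega
  have h2 : ¬(n ≥ 100) := by omega
  have h3 : ¬(n > 0) := by omega
  rw [number_to_word, letter_length]
  simp only [if_neg h1, if_neg h2, if_neg h3, if_pos (show n ≤ 0 from h)]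
  decide

theorem pvALen_eq (n : Int) (hle : n ≤ 1000) : pvALen n = letter_length n := by
  rw [pvALen_eq_clean]
  rcases le_or_gt n 0 with h0 | h0
  · exact pv_nonpos n h0
  · rcases le_or_gt n 99 with h99 | h99
    · exact pv_sub99 n (by omega) h99
    · rcases eq_or_lt_of_le hle with h1000 | h1000
      · subst h1000; decide
      · obtain ⟨h, r, rfl, hh1, hh2, hr1, hr2⟩ :
            ∃ h r : Int, n = 100*h + r ∧ 1 ≤ h ∧ h ≤ 9 ∧ 0 ≤ r ∧ r ≤ 99 :=
          ⟨n / 100, n % 100, by omega, by omega, by omega, by omega, by omega⟩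
        rw [pv_ntw_hundreds h r hh1 hh2 hr1 hr2, pv_alt_hundreds h r hh1 hh2 hr1 hr2,
          pv_clean_append, pv_clean_append]
        rw [pv_digits h hh1 hh2]
        by_cases hr : 0 < r
        · rw [if_pos hr, if_pos hr, pv_clean_append, pv_sub99 r (by omega) hr2]
          have c1 : pvClean (" hundred" : String).toList = 7 := by decide
          have c2 : pvClean (" and " : String).toList = 3 := by decide
          rw [c1, c2]
        · rw [if_neg hr, if_neg hr]
          have c1 : pvClean (" hundred" : String).toList = 7 := by decide
          have c3 : pvClean ([] : List Char) = 0 := by decide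
          rw [c1, c3]

-- ===== VERDICT (by name: the statement is the Claim_ definition above) =====
theorem total_letters_spec : Claim_equal_total_letters := by
  intro start end_ _ hpre
  unfold Spec_total_letters total_letters total_letters_alt
  rcases hpre with h | h
  · apply PySem.List.foldl_congr_mem
    intro acc x hx
    have hx' := (PySem.List.mem_pyRange_one).1 hx
    have hle : x ≤ 1000 := by omega
    have := pvALen_eq x hle
    simpa [pvALen] using congrArg (acc + ·) this
  · rw [PySem.List.pyRange_one_eq_nil (by omega)]
    rfl
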